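-- pv_equiv track=rewrite | github.com/Claire-GetHub/CS50 | S&A/UnitTests/plates.py | afterNum
-- ===== SOURCE A (Python) =====
-- def afterNum (s):
--     for c in s:
--         if not(c.isalpha()):
--             if c == '0':
--                 return False
--             else:
--                 after = s.index(c)
--                 break
--     else:
--         return True
--
--     for n in range(after, len(s)):
--         if s[n].isalpha():
--             return False
--     else:
--         return True
-- ===== SOURCE B (Python) =====
-- def afterNum(s):
--     seen_nonalpha = False
--     for c in s:
--         if seen_nonalpha:
--             if c.isalpha():
--                 return False
--         elif not c.isalpha():
--             if c == '0':
--                 return False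
--             seen_nonalpha = True
--     return True
-- ===== Notes on version B (the rewrite author's own statement) =====
-- stated objective: simpler
-- what changed: Replaced A's locate-then-rescan two-pass structure (first non-alpha found, its position recovered with s.index, then a second indexed scan from there) by a single pass over s carrying a boolean flag; no indexing or second traversal.
import Mathlib
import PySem

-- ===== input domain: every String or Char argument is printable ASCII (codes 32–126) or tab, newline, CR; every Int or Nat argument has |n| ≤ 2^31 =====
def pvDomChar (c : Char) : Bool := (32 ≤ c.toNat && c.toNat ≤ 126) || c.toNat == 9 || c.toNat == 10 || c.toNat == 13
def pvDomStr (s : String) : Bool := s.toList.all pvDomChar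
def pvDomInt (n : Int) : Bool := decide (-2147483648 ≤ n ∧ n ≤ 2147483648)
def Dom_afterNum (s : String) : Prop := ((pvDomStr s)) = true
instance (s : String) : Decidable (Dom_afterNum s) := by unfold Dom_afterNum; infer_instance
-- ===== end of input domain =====

-- B replaces A's locate-then-rescan two-pass structure with one pass carrying a boolean flag (objective: simpler).

-- ===== PORT A =====
-- second loop: for n in range(after, len(s)): if s[n].isalpha(): return False; else: return True
def aScan (cs : List Char) (after : Int) : Bool :=
  (PySem.List.pyRange after (cs.length : Int) 1).all
    (fun n => !PySem.Chars.isalpha (PySem.List.pyGetD cs n ' '))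

-- first loop: find the first non-alpha char; '0' → False; else break with after = s.index(c)
def aLoop (cs : List Char) : List Char → Bool
  | [] => true
  | c :: rest =>
    if !PySem.Chars.isalpha c then
      if c == '0' then false
      else
        match PySem.List.index? cs c with
        | some after => aScan cs (after : Int)
        | none => true   -- unreachable: c ∈ cs, index cannot raise
    else aLoop cs rest

def afterNum (s : String) : Bool := aLoop s.toList s.toList

-- ===== PORT B =====
def altLoop : Bool → List Char → Bool
  | _, [] => true
  | true, c :: rest => if PySem.Chars.isalpha c then false else altLoop true rest
  | false, c :: rest =>
    if !PySem.Chars.isalpha c then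
      if c == '0' then false else altLoop true rest
    else altLoop false rest

def afterNum_alt (s : String) : Bool := altLoop false s.toList

-- ===== PRECONDITION & SPEC =====
def Spec_afterNum (s : String) (out : Bool) : Prop := out = afterNum_alt s
instance (s : String) (out : Bool) : Decidable (Spec_afterNum s out) := by unfold Spec_afterNum; infer_instance

-- ===== CLAIM (what is proved, stated in full; the proofs are below) =====
def Claim_equal_afterNum : Prop := ∀ (s : String), Dom_afterNum s → Spec_afterNum s (afterNum s)

-- ===== LEMMAS AND PROOFS =====
theorem altLoop_true (l : List Char) :
    altLoop true l = l.all (fun c => !PySem.Chars.isalpha c) := by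
  induction l with
  | nil => rfl
  | cons c rest ih =>
    simp only [altLoop, List.all_cons, ih]
    by_cases h : PySem.Chars.isalpha c = true <;> simp [h]

theorem aScan_eq_drop (cs : List Char) (k : Nat) :
    aScan cs (k : Int) = (cs.drop k).all (fun c => !PySem.Chars.isalpha c) := by
  have h := PySem.List.map_pyGetD_pyRange' cs ' ' (a := (k : Int)) (by positivity)
  rw [Int.toNat_natCast] at h
  unfold aScan
  conv_rhs => rw [← h]
  rw [List.all_map]
  rfl

theorem aLoop_eq_altLoop (l pre : List Char)
    (hpre : ∀ c ∈ pre, PySem.Chars.isalpha c = true) :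
    aLoop (pre ++ l) l = altLoop false l := by
  induction l generalizing pre with
  | nil => rfl
  | cons c rest ih =>
    cases ha : PySem.Chars.isalpha c with
    | true =>
      have := ih (pre ++ [c]) (by
        intro x hx
        rcases List.mem_append.1 hx with h | h
        · exact hpre x h
        · simp at h; simpa [h] using ha)
      simp only [aLoop, altLoop, ha, Bool.not_true]
      simpa using this
    | false =>
      have hc : c ∉ pre := fun h => by simp [hpre c h] at ha
      by_cases h0 : c = '0'
      · subst h0; simp [aLoop, altLoop, ha]
      · have hidx : PySem.List.index? (pre ++ c :: rest) c = some pre.length := by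
          rw [PySem.List.index?_eq_some_iff]; exact ⟨pre, rest, rfl, rfl, hc⟩
        simp only [aLoop, altLoop, ha, Bool.not_false, if_true, hidx]
        rw [if_neg (by simp [h0]), if_neg (by simp [h0])]
        rw [aScan_eq_drop, List.drop_left, altLoop_true]
        simp [ha]

-- ===== VERDICT (by name: the statement is the Claim_ definition above) =====
theorem afterNum_spec : Claim_equal_afterNum := by
  intro s _
  unfold Spec_afterNum afterNum afterNum_alt
  simpa using aLoop_eq_altLoop s.toList [] (by simp)
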